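-- pv_equiv track=rewrite | github.com/assister-xyz/quality-oracle | src/core/skill_parser.py | _split_frontmatter
-- ===== SOURCE A (Python) =====
-- from typing import Any, Dict, List, Optional, Tuple
--
-- _FRONTMATTER_DELIM = "---"
--
-- def _split_frontmatter(text: str) -> Tuple[Optional[str], str]:
--     """Split a SKILL.md text into ``(frontmatter_yaml, body)``.
--
--     Returns ``(None, text)`` if no YAML frontmatter is present (the file simply
--     does not start with ``---``). Otherwise returns the YAML block (without the
--     delimiter lines) and the body that follows the closing ``---``.
--     """
--     lines = text.split("\n")
--     if not lines or lines[0].strip() != _FRONTMATTER_DELIM: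
--         return None, text
--     # Find closing delimiter.
--     for i, line in enumerate(lines[1:], start=1):
--         if line.strip() == _FRONTMATTER_DELIM:
--             fm = "\n".join(lines[1:i])
--             body = "\n".join(lines[i + 1 :])
--             # Drop a single leading newline if present.
--             if body.startswith("\n"):
--                 body = body[1:]
--             return fm, body
--     # Unclosed frontmatter — treat the whole file as body so we don't lose data.
--     return None, text
-- ===== SOURCE B (Python) =====
-- _FRONTMATTER_DELIM = "---"
--
-- def _split_frontmatter(text):
--     """Single forward pass over a line iterator with an accumulator: no
--     enumerate/index arithmetic, no re-slicing of the line list, and the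
--     'drop one leading newline' rule is applied to the body LINE LIST
--     (drop one leading empty line) before joining, instead of to the
--     joined string."""
--     lines = iter(text.split("\n"))
--     if next(lines).strip() != _FRONTMATTER_DELIM:
--         return None, text
--     fm_acc = []
--     for line in lines:
--         if line.strip() == _FRONTMATTER_DELIM:
--             body = list(lines)
--             if body and body[0] == "":
--                 del body[0]
--             return "\n".join(fm_acc), "\n".join(body)
--         fm_acc.append(line)
--     return None, text
-- ===== Notes on version B (the rewrite author's own statement) =====
-- stated objective: idiomatic
-- what changed: B makes one forward pass over a consumed line iterator with an accumulator (and drops one leading empty body LINE before joining), instead of A's enumerate-with-index scan followed by two list slices and a string-level leading-newline check.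
import Mathlib
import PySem

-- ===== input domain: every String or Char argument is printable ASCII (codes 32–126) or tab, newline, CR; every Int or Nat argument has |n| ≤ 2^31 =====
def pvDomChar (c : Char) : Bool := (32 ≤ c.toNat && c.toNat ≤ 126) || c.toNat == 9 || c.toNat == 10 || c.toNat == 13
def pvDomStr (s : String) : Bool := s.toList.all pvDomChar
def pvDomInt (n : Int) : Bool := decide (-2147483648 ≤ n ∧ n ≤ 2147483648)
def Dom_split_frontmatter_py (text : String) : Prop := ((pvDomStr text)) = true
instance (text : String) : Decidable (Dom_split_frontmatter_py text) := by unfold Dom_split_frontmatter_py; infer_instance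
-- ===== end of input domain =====

-- B replaces A's enumerate-with-index scan plus two list slices and a string-level
-- leading-newline check by one forward pass with an accumulator; same O(n) cost.

-- ===== PORT A =====
-- the 'for i, line in enumerate(lines[1:], start=1)' loop of A, with early return
def pvALoop (text : String) (lines : List (List Char)) : List (Int × List Char) → Option String × String
  | [] => (none, text)                                   -- loop fell through: unclosed frontmatter
  | (i, line) :: rest =>
    if PySem.Chars.strip line = "---".toList then
      let fm := PySem.Chars.join ['\n'] (PySem.List.slice lines (some 1) (some i))
      let body := PySem.Chars.join ['\n'] (PySem.List.slice lines (some (i + 1)) none)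
      let body := if PySem.Chars.startswith body ['\n']
                  then PySem.List.slice body (some 1) none else body
      (some (String.ofList fm), String.ofList body)
    else pvALoop text lines rest

def split_frontmatter_py (text : String) : Option String × String :=
  let lines := PySem.Chars.splitOn text.toList ['\n']
  if lines.isEmpty ∨ PySem.Chars.strip (lines.headD []) ≠ "---".toList then (none, text)
  else pvALoop text lines (PySem.List.enumerate (lines.drop 1) 1)

-- ===== PORT B =====
-- B's 'for line in lines' over the consumed iterator, carrying the accumulator fm_acc
def pvBLoop (text : String) (fmAcc : List (List Char)) : List (List Char) → Option String × String
  | [] => (none, text)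
  | line :: rest =>
    if PySem.Chars.strip line = "---".toList then
      let body := match rest with
        | [] :: t => t                                   -- 'if body and body[0] == "": del body[0]'
        | _ => rest
      (some (String.ofList (PySem.Chars.join ['\n'] fmAcc)),
       String.ofList (PySem.Chars.join ['\n'] body))
    else pvBLoop text (fmAcc ++ [line]) rest

def split_frontmatter_py_alt (text : String) : Option String × String :=
  match PySem.Chars.splitOn text.toList ['\n'] with
  | [] => (none, text)
  | first :: rest =>
    if PySem.Chars.strip first = "---".toList then pvBLoop text [] rest
    else (none, text)

-- ===== PRECONDITION & SPEC =====
def Spec_split_frontmatter_py (text : String) (out : Option String × String) : Prop := out = split_frontmatter_py_alt text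
instance (text : String) (out : Option String × String) : Decidable (Spec_split_frontmatter_py text out) := by unfold Spec_split_frontmatter_py; infer_instance

-- ===== CLAIM (what is proved, stated in full; the proofs are below) =====
def Claim_equal_split_frontmatter_py : Prop := ∀ (text : String), Dom_split_frontmatter_py text → Spec_split_frontmatter_py text (split_frontmatter_py text)

-- ===== LEMMAS AND PROOFS =====

-- pieces produced by splitOn on '\n' contain no '\n'
theorem pvGo_no_newline : ∀ (fuel : Nat) (l cur : List Char) (acc : List (List Char)),
    l.length < fuel → (∀ p ∈ acc, '\n' ∉ p) → '\n' ∉ cur →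
    ∀ p ∈ PySem.Chars.splitOn.go ['\n'] fuel l cur acc, '\n' ∉ p := by
  intro fuel
  induction fuel with
  | zero => intro l cur acc h; omega
  | succ n ih =>
    intro l cur acc hlen hacc hcur
    match l with
    | [] =>
      unfold PySem.Chars.splitOn.go
      intro p hp
      simp only [List.mem_reverse, List.mem_cons] at hp
      rcases hp with h | h
      · subst h; simpa using hcur
      · exact hacc _ h
    | c :: rest =>
      unfold PySem.Chars.splitOn.go
      by_cases hpre : List.isPrefixOf ['\n'] (c :: rest) = true
      · simp only [hpre, if_true]
        have hc : c = '\n' := by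
          obtain ⟨t, ht⟩ := List.isPrefixOf_iff_prefix.mp hpre
          simp at ht; exact ht.1.symm
        apply ih
        · simp at hlen ⊢; omega
        · intro p hp
          rcases List.mem_cons.mp hp with h | h
          · subst h; simpa using hcur
          · exact hacc _ h
        · simp
      · simp only [hpre]
        apply ih
        · simp at hlen ⊢; omega
        · exact hacc
        · intro h
          rcases List.mem_cons.mp h with h | h
          · apply hpre
            subst h
            simp [List.isPrefixOf]
          · exact hcur h

theorem pvSplitOn_no_newline (cs : List Char) :
    ∀ p ∈ PySem.Chars.splitOn cs ['\n'], '\n' ∉ p := by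
  unfold PySem.Chars.splitOn
  exact pvGo_no_newline (cs.length + 1) cs [] [] (by omega) (by simp) (by simp)

theorem pvLoop_eq (text : String) :
    ∀ (rest pre : List (List Char)) (first : List Char),
      (∀ p ∈ rest, '\n' ∉ p) →
      pvALoop text (first :: pre ++ rest) (PySem.List.enumerate rest ((pre.length : Int) + 1)) =
        pvBLoop text pre rest := by
  intro rest
  induction rest with
  | nil =>
    intro pre first _
    simp [PySem.List.enumerate, pvALoop, pvBLoop]
  | cons line rest' ih =>
    intro pre first h
    rw [PySem.List.enumerate_cons]
    by_cases hl : PySem.Chars.strip line = "---".toList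
    · have hfm : PySem.List.slice (first :: pre ++ line :: rest') (some 1)
          (some ((pre.length : Int) + 1)) = pre := by
        rw [show ((pre.length : Int) + 1) = ((pre.length + 1 : Nat) : Int) by push_cast; ring,
          show (1 : Int) = ((1 : Nat) : Int) from rfl, PySem.List.slice_natCast]
        simp [List.take_left']
      have hbody : PySem.List.slice (first :: pre ++ line :: rest')
          (some ((pre.length : Int) + 1 + 1)) none = rest' := by
        rw [show ((pre.length : Int) + 1 + 1) = ((pre.length + 2 : Nat) : Int) by push_cast; ring,
          PySem.List.slice_from_natCast]
        have : first :: pre ++ line :: rest' = (first :: pre ++ [line]) ++ rest' := by simp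
        rw [this, List.drop_left' (by simp)]
      simp only [pvALoop, pvBLoop, hl, if_pos, hfm, hbody]
      match rest' with
      | [] => simp [PySem.Chars.join_nil, PySem.Chars.startswith]
      | [] :: t =>
        match t with
        | [] => simp [PySem.Chars.join_singleton, PySem.Chars.join_nil,
                  PySem.Chars.startswith]
        | q :: t' =>
          rw [PySem.Chars.join_cons_cons]
          simp [PySem.Chars.startswith, List.isPrefixOf, PySem.List.slice_from_one]
      | (c :: cs) :: t =>
        have hc : c ≠ '\n' := by
          intro hcc
          exact h ([c] ++ cs) (by simp) (by simp [hcc])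
        match t with
        | [] => simp [PySem.Chars.join_singleton, PySem.Chars.startswith, List.isPrefixOf, Ne.symm hc]
        | q :: t' =>
          rw [PySem.Chars.join_cons_cons]
          simp [PySem.Chars.startswith, List.isPrefixOf, Ne.symm hc]
    · simp only [pvALoop, pvBLoop, hl, reduceIte]
      have := ih (pre ++ [line]) first (fun p hp => h p (List.mem_cons_of_mem _ hp))
      have harr : first :: (pre ++ [line]) ++ rest' = first :: pre ++ line :: rest' := by simp
      have hidx : (((pre ++ [line]).length : Int) + 1) = (pre.length : Int) + 1 + 1 := by
        simp
      rw [harr, hidx] at this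
      exact this

-- ===== VERDICT (by name: the statement is the Claim_ definition above) =====
theorem split_frontmatter_py_spec : Claim_equal_split_frontmatter_py := by
  intro text _
  unfold Spec_split_frontmatter_py split_frontmatter_py split_frontmatter_py_alt
  have hnn := pvSplitOn_no_newline text.toList
  cases h : PySem.Chars.splitOn text.toList ['\n'] with
  | nil => simp
  | cons first rest =>
    by_cases hd : PySem.Chars.strip first = "---".toList
    · have := pvLoop_eq text rest [] first (by intro p hp; exact hnn p (h ▸ List.mem_cons_of_mem _ hp))
      simp only [List.isEmpty_cons, List.headD_cons, hd, ne_eq, not_true_eq_false,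
        List.drop_succ_cons, List.drop_zero]
      simpa using this
    · rw [show "---".toList = ['-', '-', '-'] from rfl] at hd
      simp [hd]
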